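-- pv_equiv track=rewrite | github.com/Tsukass4/Pactica2_Ordenamiento | Algoritmos_Ordenamiento/002_Externo/002_Natu_Merg.py | obtener_runs_naturales
-- ===== SOURCE A (Python) =====
-- def obtener_runs_naturales(datos):
--     """Identifica y extrae las secuencias ya ordenadas (runs naturales) de los datos."""
--     runs = []
--     if not datos:
--         return runs
--
--     run_actual = [datos[0]]
--     for i in range(1, len(datos)):
--         if datos[i] >= datos[i-1]:
--             # El elemento actual es mayor o igual, continúa el run
--             run_actual.append(datos[i])
--         else:
--             # El orden se rompe, el run actual termina
--             runs.append(run_actual)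
--             run_actual = [datos[i]]
--
--     # Agregar el último run
--     runs.append(run_actual)
--     return runs
-- ===== SOURCE B (Python) =====
-- def obtener_runs_naturales(datos):
--     """Identifica y extrae las secuencias ya ordenadas (runs naturales) de los datos."""
--     if not datos:
--         return []
--     n = len(datos)
--     cuts = [0]
--     for i in range(1, n):
--         if datos[i] < datos[i - 1]:
--             cuts.append(i)
--     cuts.append(n)
--     return [datos[a:b] for a, b in zip(cuts, cuts[1:])]
-- ===== Notes on version B (the rewrite author's own statement) =====
-- stated objective: alternative
-- what changed: B replaces A's single-pass incremental run accumulator with a two-pass cut-point scheme: first collect the boundary indices where order breaks, then slice the list between consecutive cut points.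
import Mathlib
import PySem

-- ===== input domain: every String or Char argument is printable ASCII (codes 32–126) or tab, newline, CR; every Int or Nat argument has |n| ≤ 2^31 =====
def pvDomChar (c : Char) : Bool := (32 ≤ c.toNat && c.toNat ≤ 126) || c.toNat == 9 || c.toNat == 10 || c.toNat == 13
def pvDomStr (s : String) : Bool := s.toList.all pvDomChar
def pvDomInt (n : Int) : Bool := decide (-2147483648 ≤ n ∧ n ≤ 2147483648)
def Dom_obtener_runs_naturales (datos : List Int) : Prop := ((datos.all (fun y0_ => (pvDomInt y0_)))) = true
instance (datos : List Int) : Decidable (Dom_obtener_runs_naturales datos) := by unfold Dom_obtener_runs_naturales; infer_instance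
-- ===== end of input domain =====

-- B replaces A's incremental run accumulator with a two-pass cut-point decomposition (collect break indices, then slice); same O(n) cost, alternative structure.

-- ===== PORT A =====
def obtener_runs_naturales (datos : List Int) : List (List Int) :=
  if datos = [] then []
  else
    let st := (PySem.List.pyRange 1 (datos.length : Int) 1).foldl
      (fun (st : List (List Int) × List Int) i =>
        if PySem.List.pyGetD datos (i-1) 0 ≤ PySem.List.pyGetD datos i 0
        then (st.1, st.2 ++ [PySem.List.pyGetD datos i 0])
        else (st.1 ++ [st.2], [PySem.List.pyGetD datos i 0]))
      ([], [PySem.List.pyGetD datos 0 0])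
    st.1 ++ [st.2]

-- ===== PORT B =====
def obtener_runs_naturales_alt (datos : List Int) : List (List Int) :=
  if datos = [] then []
  else
    let cuts : List Int := 0 :: ((PySem.List.pyRange 1 (datos.length : Int) 1).filter
        (fun i => PySem.List.pyGetD datos i 0 < PySem.List.pyGetD datos (i-1) 0)) ++ [(datos.length : Int)]
    (cuts.zip cuts.tail).map (fun p => PySem.List.slice datos (some p.1) (some p.2))

-- ===== PRECONDITION & SPEC =====
def Spec_obtener_runs_naturales (datos : List Int) (out : List (List Int)) : Prop := out = obtener_runs_naturales_alt datos
instance (datos : List Int) (out : List (List Int)) : Decidable (Spec_obtener_runs_naturales datos out) := by unfold Spec_obtener_runs_naturales; infer_instance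

-- ===== CLAIM (what is proved, stated in full; the proofs are below) =====
def Claim_equal_obtener_runs_naturales : Prop := ∀ (datos : List Int), Dom_obtener_runs_naturales datos → Spec_obtener_runs_naturales datos (obtener_runs_naturales datos)

-- ===== LEMMAS AND PROOFS =====

-- proof-side name for B's slicing of a cut list
def pvSlices (datos : List Int) (cuts : List Int) : List (List Int) :=
  (cuts.zip cuts.tail).map (fun p => PySem.List.slice datos (some p.1) (some p.2))

lemma slice_snoc (datos : List Int) (s j : Int) (h0 : 0 ≤ s) (hsj : s ≤ j)
    (hj : j < (datos.length : Int)) :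
    PySem.List.slice datos (some s) (some j) ++ [PySem.List.pyGetD datos j 0]
      = PySem.List.slice datos (some s) (some (j+1)) := by
  have h0j : (0:Int) ≤ j := le_trans h0 hsj
  rw [PySem.List.slice_toNat datos h0 h0j, PySem.List.slice_toNat datos h0 (by omega),
    PySem.List.pyGetD_eq_getElem datos 0 h0j hj]
  have h1 : (j+1).toNat - s.toNat = (j.toNat - s.toNat) + 1 := by omega
  rw [h1, List.take_add_one]
  have h2 : (List.drop s.toNat datos)[j.toNat - s.toNat]? = some datos[j.toNat] := by
    rw [List.getElem?_drop, List.getElem?_eq_getElem (by omega)]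
    congr 1; congr 1; omega
  simp [h2]

lemma slice_empty (datos : List Int) (j : Int) (h : 0 ≤ j) :
    PySem.List.slice datos (some j) (some j) = [] := by
  rw [PySem.List.slice_toNat datos h h]; simp

-- loop invariant: A's fold from index j with current run = datos[s:j] produces B's slices of the remaining cut list
lemma run_loop (datos : List Int) :
    ∀ (k : Nat) (j s : Int) (runs : List (List Int)),
      (datos.length : Int) - j ≤ k → 1 ≤ j → j ≤ (datos.length : Int) → 0 ≤ s → s < j →
      (let F := (PySem.List.pyRange j (datos.length : Int) 1).foldl
          (fun (st : List (List Int) × List Int) i =>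
            if PySem.List.pyGetD datos (i-1) 0 ≤ PySem.List.pyGetD datos i 0
            then (st.1, st.2 ++ [PySem.List.pyGetD datos i 0])
            else (st.1 ++ [st.2], [PySem.List.pyGetD datos i 0]))
          (runs, PySem.List.slice datos (some s) (some j))
       F.1 ++ [F.2]) =
      runs ++ pvSlices datos (s :: ((PySem.List.pyRange j (datos.length : Int) 1).filter
          (fun i => PySem.List.pyGetD datos i 0 < PySem.List.pyGetD datos (i-1) 0)) ++ [(datos.length : Int)]) := by
  intro k
  induction k with
  | zero =>
    intro j s runs hk hj hjle hs hsj
    rw [PySem.List.pyRange_one_eq_nil (by omega)]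
    have hjn : j = (datos.length : Int) := by omega
    simp [pvSlices, hjn]
  | succ k ih =>
    intro j s runs hk hj hjle hs hsj
    by_cases hbig : (datos.length : Int) ≤ j
    · rw [PySem.List.pyRange_one_eq_nil hbig]
      have hjn : j = (datos.length : Int) := by omega
      simp [pvSlices, hjn]
    · rw [not_le] at hbig
      rw [PySem.List.pyRange_one_cons hbig]
      simp only [List.foldl_cons, List.filter_cons]
      by_cases hcond : PySem.List.pyGetD datos (j-1) 0 ≤ PySem.List.pyGetD datos j 0
      · rw [if_pos hcond]
        have hfilt : (decide (PySem.List.pyGetD datos j 0 < PySem.List.pyGetD datos (j-1) 0)) = false := by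
          simp; omega
        rw [hfilt]
        rw [slice_snoc datos s j hs (by omega) hbig]
        exact ih (j+1) s runs (by omega) (by omega) (by omega) hs (by omega)
      · rw [if_neg hcond]
        have hfilt : (decide (PySem.List.pyGetD datos j 0 < PySem.List.pyGetD datos (j-1) 0)) = true := by
          simp; omega
        rw [hfilt]
        have hsingle : [PySem.List.pyGetD datos j 0] = PySem.List.slice datos (some j) (some (j+1)) := by
          rw [← slice_snoc datos j j (by omega) le_rfl hbig, slice_empty datos j (by omega)]
          simp
        rw [hsingle]
        have := ih (j+1) j (runs ++ [PySem.List.slice datos (some s) (some j)]) (by omega) (by omega) (by omega) (by omega) (by omega)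
        rw [this]
        simp [pvSlices]

-- ===== VERDICT (by name: the statement is the Claim_ definition above) =====
theorem obtener_runs_naturales_spec : Claim_equal_obtener_runs_naturales := by
  intro datos _
  unfold Spec_obtener_runs_naturales obtener_runs_naturales obtener_runs_naturales_alt
  by_cases h : datos = []
  · simp [h]
  · rw [if_neg h, if_neg h]
    have hlen : 0 < (datos.length : Int) := by
      have := List.length_pos_iff.mpr h; omega
    have h01 := slice_snoc datos 0 0 le_rfl le_rfl hlen
    rw [slice_empty datos 0 le_rfl, List.nil_append] at h01
    rw [h01]
    have := run_loop datos datos.length 1 0 [] (by omega) le_rfl (by omega) le_rfl (by omega)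
    simpa [pvSlices] using this
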